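-- pv_equiv track=rewrite | github.com/tac-tics/ploverize | phonetic_words.py | initial_in_outline
-- ===== SOURCE A (Python) =====
-- def initial_in_outline(outline):
--     result = []
--     for ch in outline:
--         if ch in 'AEOU*':
--             break
--         else:
--             result.append(ch)
--     return ''.join(result)
-- ===== SOURCE B (Python) =====
-- def initial_in_outline(outline):
--     i = next((j for j, ch in enumerate(outline) if ch in 'AEOU*'), len(outline))
--     return outline[:i]
-- ===== Notes on version B (the rewrite author's own statement) =====
-- stated objective: simpler
-- what changed: B computes the boundary index (first occurrence of a character in 'AEOU*') in one expression and returns a single slice, instead of A's loop that appends characters one at a time and breaks.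
import Mathlib
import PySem

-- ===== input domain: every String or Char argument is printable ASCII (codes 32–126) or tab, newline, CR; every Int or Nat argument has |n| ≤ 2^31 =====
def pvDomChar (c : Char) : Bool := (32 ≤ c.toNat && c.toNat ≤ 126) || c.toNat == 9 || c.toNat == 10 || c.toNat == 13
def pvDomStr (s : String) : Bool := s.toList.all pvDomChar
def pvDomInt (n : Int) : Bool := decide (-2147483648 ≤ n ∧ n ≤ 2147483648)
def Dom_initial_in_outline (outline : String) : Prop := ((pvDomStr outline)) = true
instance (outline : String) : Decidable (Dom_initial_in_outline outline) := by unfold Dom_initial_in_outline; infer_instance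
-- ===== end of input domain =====

-- B replaces A's append-and-break loop by computing the first stop-character index and slicing once (objective: simpler).


-- ===== PORT A =====
-- the loop: append each char until one of 'AEOU*' is seen, then break
def initialLoopA : List Char → List Char
  | [] => []
  | c :: cs => if ("AEOU*".toList).contains c then [] else c :: initialLoopA cs

def initial_in_outline (outline : String) : String :=
  String.ofList (initialLoopA outline.toList)

-- ===== PORT B =====
-- i = first index whose char is in 'AEOU*' (default len), then outline[:i]
def initial_in_outline_alt (outline : String) : String :=
  let cs := outline.toList
  let i : Nat := (cs.findIdx? (fun ch => ("AEOU*".toList).contains ch)).getD cs.length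
  String.ofList (PySem.List.slice cs none (some (i : Int)))

-- ===== PRECONDITION & SPEC =====
def Spec_initial_in_outline (outline : String) (out : String) : Prop := out = initial_in_outline_alt outline
instance (outline : String) (out : String) : Decidable (Spec_initial_in_outline outline out) := by unfold Spec_initial_in_outline; infer_instance

-- ===== CLAIM (what is proved, stated in full; the proofs are below) =====
def Claim_equal_initial_in_outline : Prop := ∀ (outline : String), Dom_initial_in_outline outline → Spec_initial_in_outline outline (initial_in_outline outline)

-- ===== LEMMAS AND PROOFS =====
theorem initialLoopA_eq_take (cs : List Char) :
    initialLoopA cs = cs.take ((cs.findIdx? (fun ch => ("AEOU*".toList).contains ch)).getD cs.length) := by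
  induction cs with
  | nil => rfl
  | cons c cs ih =>
    rw [initialLoopA, List.findIdx?_cons]
    by_cases h : ("AEOU*".toList).contains c = true
    · rw [if_pos h, if_pos h]; rfl
    · rw [if_neg h, if_neg h, ih]
      cases hf : cs.findIdx? (fun ch => ("AEOU*".toList).contains ch) <;> simp

-- ===== VERDICT (by name: the statement is the Claim_ definition above) =====
theorem initial_in_outline_spec : Claim_equal_initial_in_outline := by
  intro outline _
  unfold Spec_initial_in_outline initial_in_outline initial_in_outline_alt
  simp [initialLoopA_eq_take, PySem.List.slice_to_natCast]
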